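-- pv_equiv track=rewrite | github.com/ZacBBedont/SF-2 | sets/lab08.py | mostCovered
-- ===== SOURCE A (Python) =====
-- def mostCovered(d1):
--     most = 0
--     best_month = []
--     for month in d1:
--         count = 0
--         for name in d1[month].values():
--             count += len(name)
--         if count > most:
--             most = count
--             best_month = [month]
--         elif count == most:
--             best_month.append(month)
--     return best_month
-- ===== SOURCE B (Python) =====
-- def mostCovered(d1):
--     counts = {m: sum(len(v) for v in sub.values()) for m, sub in d1.items()}
--     if not counts:
--         return []
--     best = max(counts.values())
--     return [m for m, c in counts.items() if c == best]
-- ===== Notes on version B (the rewrite author's own statement) =====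
-- stated objective: simpler
-- what changed: Replaces A's interleaved running-max loop (which resets/extends the best list as it scans) by a table build (month -> total length), then a separate max over the table and a filter of the months attaining it.
import Mathlib
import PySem

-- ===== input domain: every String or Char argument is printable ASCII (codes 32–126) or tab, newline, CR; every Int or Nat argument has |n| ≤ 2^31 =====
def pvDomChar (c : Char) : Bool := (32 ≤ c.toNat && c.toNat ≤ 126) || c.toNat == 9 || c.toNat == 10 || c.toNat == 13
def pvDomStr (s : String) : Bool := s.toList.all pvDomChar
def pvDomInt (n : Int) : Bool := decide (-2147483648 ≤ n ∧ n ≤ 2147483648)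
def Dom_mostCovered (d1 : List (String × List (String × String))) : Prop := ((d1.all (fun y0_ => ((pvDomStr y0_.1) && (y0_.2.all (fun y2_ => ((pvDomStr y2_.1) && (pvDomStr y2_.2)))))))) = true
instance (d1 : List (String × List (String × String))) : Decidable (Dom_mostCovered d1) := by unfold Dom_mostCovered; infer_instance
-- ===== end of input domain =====

-- B replaces A's interleaved running-max/reset loop by: build a month→total table, take its max, filter (simpler decomposition).

-- ===== PORT A =====
-- literal transliteration of A: one fold over the dict's items carrying (most, best_month);
-- the inner 'for name in d1[month].values(): count += len(name)' is a fold over the sub-dict's values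
def mostCovered (d1 : List (String × List (String × String))) : List String :=
  (d1.foldl (fun (st : Int × List String) p =>
      let count := p.2.foldl (fun c q => c + PySem.Str.len q.2) 0
      if count > st.1 then (count, [p.1])
      else if count == st.1 then (st.1, st.2 ++ [p.1])
      else st)
    (0, [])).2

-- ===== PORT B =====
-- sum(len(v) for v in sub.values())
def pvMonthCount (sub : List (String × String)) : Int :=
  (sub.map (fun q => PySem.Str.len q.2)).sum

def mostCovered_alt (d1 : List (String × List (String × String))) : List String :=
  let counts := d1.map (fun p => (p.1, pvMonthCount p.2))
  if counts.isEmpty then []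
  else
    match PySem.List.max? (counts.map Prod.snd) (fun x => x) with
    | none => []
    | some best => (counts.filter (fun p => p.2 == best)).map Prod.fst

-- ===== PRECONDITION & SPEC =====
def Spec_mostCovered (d1 : List (String × List (String × String))) (out : List String) : Prop := out = mostCovered_alt d1
instance (d1 : List (String × List (String × String))) (out : List String) : Decidable (Spec_mostCovered d1 out) := by unfold Spec_mostCovered; infer_instance

-- ===== CLAIM (what is proved, stated in full; the proofs are below) =====
def Claim_equal_mostCovered : Prop := ∀ (d1 : List (String × List (String × String))), Dom_mostCovered d1 → Spec_mostCovered d1 (mostCovered d1)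

-- ===== LEMMAS AND PROOFS =====

-- characterisation of A's fold (running max with best-list reset/append) from an arbitrary state,
-- generic in the count key k and the emitted name nm
theorem pv_foldA_char {α : Type} (k : α → Int) (nm : α → String) (l : List α) (m : Int) (b : List String) :
    l.foldl (fun (st : Int × List String) p =>
        if k p > st.1 then (k p, [nm p])
        else if k p == st.1 then (st.1, st.2 ++ [nm p])
        else st) (m, b)
    = (l.foldl (fun a p => max a (k p)) m,
       if l.foldl (fun a p => max a (k p)) m > m
         then (l.filter (fun p => k p == l.foldl (fun a p => max a (k p)) m)).map nm
         else b ++ (l.filter (fun p => k p == m)).map nm) := by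
  induction l generalizing m b with
  | nil => simp
  | cons hd t ih =>
    have hmax := PySem.List.le_foldl_max_int t k (k hd)
    by_cases h1 : k hd > m
    · have hmc : max m (k hd) = k hd := by omega
      simp only [List.foldl_cons, hmc]
      rw [if_pos h1, ih]
      have hM : m < t.foldl (fun a p => max a (k p)) (k hd) := by omega
      rw [if_pos hM]
      by_cases h2 : k hd < t.foldl (fun a p => max a (k p)) (k hd)
      · rw [if_pos h2]
        have hne : ((k hd == t.foldl (fun a p => max a (k p)) (k hd)) = false) := by
          simp; omega
        simp [hne]
      · rw [if_neg h2]
        have hceq : t.foldl (fun a p => max a (k p)) (k hd) = k hd := by omega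
        simp only [List.filter_cons, hceq]
        simp
    · have hmc : max m (k hd) = m := by omega
      simp only [List.foldl_cons, hmc]
      rw [if_neg h1, ih]
      by_cases h2 : k hd = m
      · rw [if_pos (by simp [h2])]
        by_cases hM : t.foldl (fun a p => max a (k p)) m > m
        · rw [if_pos hM, if_pos hM]
          have hne : ((k hd == t.foldl (fun a p => max a (k p)) m) = false) := by
            simp; omega
          simp [hne]
        · rw [if_neg hM, if_neg hM]
          simp [h2]
      · rw [if_neg (by simpa using h2)]
        have hm2 := (PySem.List.le_foldl_max_int t k m).1
        have hne : ((k hd == m) = false) := by simpa using h2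
        have hne2 : ((k hd == t.foldl (fun a p => max a (k p)) m) = false) := by
          simp; omega
        simp [hne, hne2]

-- each month's count is nonnegative
theorem pv_monthCount_nonneg (sub : List (String × String)) : 0 ≤ pvMonthCount sub := by
  unfold pvMonthCount
  apply List.sum_nonneg
  intro x hx
  simp only [List.mem_map] at hx
  obtain ⟨q, _, rfl⟩ := hx
  rw [PySem.Str.len_eq]
  positivity

theorem mostCovered_eq_filter (d1 : List (String × List (String × String))) :
    mostCovered d1 =
      ((d1.map (fun p => (p.1, pvMonthCount p.2))).filter
        (fun p => p.2 == (d1.map (fun p => (p.1, pvMonthCount p.2))).foldl (fun a p => max a p.2) 0)).map Prod.fst := by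
  unfold mostCovered
  have hfun : (fun (st : Int × List String) (p : String × List (String × String)) =>
      let count := p.2.foldl (fun c q => c + PySem.Str.len q.2) 0
      if count > st.1 then (count, [p.1])
      else if count == st.1 then (st.1, st.2 ++ [p.1])
      else st)
      = (fun (st : Int × List String) p =>
        if pvMonthCount p.2 > st.1 then (pvMonthCount p.2, [p.1])
        else if pvMonthCount p.2 == st.1 then (st.1, st.2 ++ [p.1])
        else st) := by
    funext st p
    have h : p.2.foldl (fun c q => c + PySem.Str.len q.2) 0 = pvMonthCount p.2 := by
      rw [PySem.List.foldl_add]; unfold pvMonthCount; simp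
    simp only [h]
  rw [hfun]
  rw [pv_foldA_char (fun p => pvMonthCount p.2) (fun p => p.1) d1 0 []]
  simp only [List.foldl_map, List.filter_map, List.map_map, Function.comp_def]
  by_cases hM : d1.foldl (fun a p => max a (pvMonthCount p.2)) 0 > 0
  · simp [hM]
  · have hM0 : d1.foldl (fun a p => max a (pvMonthCount p.2)) 0 = 0 := by
      have := (PySem.List.le_foldl_max_int d1 (fun p => pvMonthCount p.2) 0).1
      omega
    simp [hM0]

-- the max? in B equals the running max from 0 (counts are nonnegative)
theorem pv_max_alt (cs : List (String × Int)) (hne : cs ≠ [])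
    (hpos : ∀ p ∈ cs, 0 ≤ p.2) :
    PySem.List.max? (cs.map Prod.snd) (fun x => x)
      = some (cs.foldl (fun a p => max a p.2) 0) := by
  obtain ⟨⟨s, c⟩, t, rfl⟩ := List.exists_cons_of_ne_nil hne
  simp only [List.map_cons]
  rw [PySem.List.max?_id_cons]
  congr 1
  have hc : 0 ≤ c := hpos (s, c) (by simp)
  have hmc : max 0 c = c := by omega
  simp only [List.foldl_cons, hmc]
  rw [List.foldl_map]

-- ===== VERDICT (by name: the statement is the Claim_ definition above) =====
theorem mostCovered_spec : Claim_equal_mostCovered := by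
  intro d1 _
  unfold Spec_mostCovered mostCovered_alt
  rw [mostCovered_eq_filter]
  set cs := d1.map (fun p => (p.1, pvMonthCount p.2)) with hcsdef
  by_cases hne : cs = []
  · simp [hne]
  · have hpos : ∀ p ∈ cs, 0 ≤ p.2 := by
      intro p hp
      rw [hcsdef] at hp
      simp only [List.mem_map] at hp
      obtain ⟨q, _, rfl⟩ := hp
      exact pv_monthCount_nonneg q.2
    simp only [List.isEmpty_iff, hne, if_false]
    rw [pv_max_alt cs hne hpos]
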